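-- pv_equiv track=rewrite | github.com/iamsavva/shortest-walk-through-gcs | shortest_walk_through_gcs/util.py | all_possible_combinations_of_items
-- ===== SOURCE A (Python) =====
-- import typing as T
--
-- def all_possible_combinations_of_items(item_set: T.List[str], num_items: int):
--     """
--     Recursively generate a set of all possible ordered strings of items of length num_items.
--     """
--     if num_items == 0:
--         return [""]
--     result = []
--     possible_n_1 = all_possible_combinations_of_items(item_set, num_items - 1)
--     for item in item_set:
--         result += [item + x for x in possible_n_1]
--     return result
-- ===== SOURCE B (Python) =====
-- import typing as T
--
-- def all_possible_combinations_of_items(item_set: T.List[str], num_items: int):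
--     """Iteratively build all ordered strings of length num_items (bottom-up, no recursion)."""
--     result = [""]
--     for _ in range(num_items):
--         result = [item + x for item in item_set for x in result]
--     return result
-- ===== Notes on version B (the rewrite author's own statement) =====
-- stated objective: simpler
-- what changed: Replaces the recursion with a bottom-up loop that rebuilds the list num_items times via a single comprehension, instead of recursive calls plus an accumulator loop with repeated list concatenation.
import Mathlib
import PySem

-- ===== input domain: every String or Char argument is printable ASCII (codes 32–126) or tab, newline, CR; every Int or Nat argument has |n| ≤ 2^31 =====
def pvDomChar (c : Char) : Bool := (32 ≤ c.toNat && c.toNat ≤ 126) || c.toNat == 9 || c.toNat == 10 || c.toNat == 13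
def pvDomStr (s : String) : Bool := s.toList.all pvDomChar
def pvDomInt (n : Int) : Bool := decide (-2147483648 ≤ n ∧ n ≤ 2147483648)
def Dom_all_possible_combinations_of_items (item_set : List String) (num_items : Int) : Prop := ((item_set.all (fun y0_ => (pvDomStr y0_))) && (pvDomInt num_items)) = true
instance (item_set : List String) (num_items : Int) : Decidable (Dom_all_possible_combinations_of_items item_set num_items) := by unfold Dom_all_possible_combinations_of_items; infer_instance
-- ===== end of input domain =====

-- B replaces A's recursion with a bottom-up loop (simpler decomposition, same cost).


-- ===== PORT A =====
-- A's recursion on num_items; run on num_items.toNat (faithful on Pre_: 0 ≤ num_items,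
-- where Python A returns; on negatives Python A recurses forever).
def apcA (item_set : List String) : Nat → List String
  | 0 => [""]
  | n + 1 =>
    let possible_n_1 := apcA item_set n
    item_set.foldl (fun result item => result ++ possible_n_1.map (fun x => item ++ x)) []

def all_possible_combinations_of_items (item_set : List String) (num_items : Int) : List String :=
  apcA item_set num_items.toNat

-- ===== PORT B =====
-- bottom-up: repeat num_items times result = [item + x for item in item_set for x in result]
def all_possible_combinations_of_items_alt (item_set : List String) (num_items : Int) : List String :=
  (List.range num_items.toNat).foldl
    (fun result _ => item_set.flatMap (fun item => result.map (fun x => item ++ x))) [""]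

-- ===== PRECONDITION & SPEC =====
-- Pre_ excludes num_items < 0, on which Python A raises RecursionError (infinite recursion).
def Pre_all_possible_combinations_of_items (item_set : List String) (num_items : Int) : Prop :=
  0 ≤ num_items
instance (item_set : List String) (num_items : Int) : Decidable (Pre_all_possible_combinations_of_items item_set num_items) := by unfold Pre_all_possible_combinations_of_items; infer_instance

def pvWitness_all_possible_combinations_of_items : List String × Int := (["a", "b"], 2)

def Spec_all_possible_combinations_of_items (item_set : List String) (num_items : Int) (out : List String) : Prop := out = all_possible_combinations_of_items_alt item_set num_items
instance (item_set : List String) (num_items : Int) (out : List String) : Decidable (Spec_all_possible_combinations_of_items item_set num_items out) := by unfold Spec_all_possible_combinations_of_items; infer_instance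

-- ===== CLAIM (what is proved, stated in full; the proofs are below) =====
def Claim_equal_all_possible_combinations_of_items : Prop := ∀ (item_set : List String) (num_items : Int), Dom_all_possible_combinations_of_items item_set num_items → Pre_all_possible_combinations_of_items item_set num_items → Spec_all_possible_combinations_of_items item_set num_items (all_possible_combinations_of_items item_set num_items)

-- ===== LEMMAS AND PROOFS =====

-- A's inner accumulator loop is B's one flat comprehension.
theorem apcA_succ (item_set : List String) (n : Nat) :
    apcA item_set (n + 1)
      = item_set.flatMap (fun item => (apcA item_set n).map (fun x => item ++ x)) := by
  simp [apcA, List.flatMap_def]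

theorem apcA_eq_iter (item_set : List String) (n : Nat) :
    apcA item_set n
      = (List.range n).foldl
          (fun result _ => item_set.flatMap (fun item => result.map (fun x => item ++ x))) [""] := by
  induction n with
  | zero => simp [apcA]
  | succ n ih => rw [apcA_succ, ih, List.range_succ, List.foldl_append]; simp

-- ===== VERDICT (by name: the statement is the Claim_ definition above) =====
theorem all_possible_combinations_of_items_spec : Claim_equal_all_possible_combinations_of_items := by
  intro item_set num_items _ _
  unfold Spec_all_possible_combinations_of_items all_possible_combinations_of_items
    all_possible_combinations_of_items_alt
  exact apcA_eq_iter item_set num_items.toNat
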